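-- pv_equiv track=rewrite | github.com/xolarvill/web_setup_automation | parse.py | extract_cutout_currentline
-- ===== SOURCE A (Python) =====
-- from typing import List
--
-- def extract_cutout_currentline(text: str, keywords: List[str])-> dict:
--     """
--     提取以指定关键词开头的所有行。
--     :param text: 输入的多行字符串
--     :param keywords: 关键词列表
--     :return: dict，key为关键词，value为所有匹配行组成的列表
--     """
--     lines = text.splitlines()
--     keyword_set = set(keywords)
--     cutouts = {k: [] for k in keywords}
--     for line in lines:
--         stripped = line.strip()
--         for keyword in keyword_set:
--             if stripped.startswith(keyword):
--                 cutouts[keyword].append(line)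
--     return cutouts
-- ===== SOURCE B (Python) =====
-- def extract_cutout_currentline(text, keywords):
--     """Prefix-lookup reimplementation: instead of testing every keyword against
--     every line, hash the keywords once and, for each stripped line, look up each
--     of its prefixes (up to the longest keyword) in that table."""
--     index = {}
--     for k in keywords:
--         index.setdefault(k, [])
--     maxlen = max(map(len, index), default=0)
--     for line in text.splitlines():
--         s = line.strip()
--         for i in range(min(len(s), maxlen) + 1):
--             p = s[:i]
--             if p in index:
--                 index[p].append(line)
--     return index
-- ===== Notes on version B (the rewrite author's own statement) =====
-- stated objective: alternative
-- what changed: Instead of testing every keyword against every stripped line, B builds the keyword dict once and, per line, looks up each prefix of the stripped line (only up to the longest keyword) in that hash table, so the per-line work no longer scans the keyword list.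
import Mathlib
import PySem

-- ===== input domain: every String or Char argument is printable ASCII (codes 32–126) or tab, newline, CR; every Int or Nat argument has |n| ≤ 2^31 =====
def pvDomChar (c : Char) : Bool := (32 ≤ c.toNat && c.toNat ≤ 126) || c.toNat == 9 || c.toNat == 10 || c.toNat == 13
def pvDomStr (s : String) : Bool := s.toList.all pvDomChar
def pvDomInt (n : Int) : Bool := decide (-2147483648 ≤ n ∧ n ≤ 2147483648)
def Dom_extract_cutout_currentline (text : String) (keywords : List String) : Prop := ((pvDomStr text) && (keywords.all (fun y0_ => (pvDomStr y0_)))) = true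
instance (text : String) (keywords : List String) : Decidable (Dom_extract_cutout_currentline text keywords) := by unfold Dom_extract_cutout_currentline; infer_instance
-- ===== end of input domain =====

-- B replaces the per-line scan over all keywords by a hash lookup of each prefix of the
-- stripped line (up to the longest keyword) in a keyword table; same exact result.

-- ===== PORT A =====
-- The Python inner loop iterates the SET keyword_set; each keyword's bucket is updated
-- independently of the others, so the result does not depend on the set's iteration
-- order and iterating PySem.Set.ofList keywords (first occurrences) is exact.
-- cutouts[keyword].append(line) is ported as Dict.modify keyword [] (· ++ [line]);
-- the default [] is never used since every keyword is a key of cutouts.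
def extract_cutout_currentline (text : String) (keywords : List String) : List (String × List String) :=
  let lines := PySem.Str.splitlines text
  let keyword_set : PySem.Set String := PySem.Set.ofList keywords
  let cutouts : PySem.Dict String (List String) :=
    keywords.foldl (fun d k => d.insert k []) PySem.Dict.empty
  let final := lines.foldl (fun d line =>
    let stripped := PySem.Str.strip line
    keyword_set.foldl (fun d keyword =>
      if PySem.Str.startswith stripped keyword then d.modify keyword [] (fun v => v ++ [line]) else d) d) cutouts
  final.items

-- ===== PORT B =====
-- helper: 'p = s[:i]; if p in index: index[p].append(line)' from Source B's inner loop
def pvHitB (line : String) (d : PySem.Dict String (List String)) (p : String) : PySem.Dict String (List String) :=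
  if d.contains p then d.modify p [] (fun v => v ++ [line]) else d

def extract_cutout_currentline_alt (text : String) (keywords : List String) : List (String × List String) :=
  let index : PySem.Dict String (List String) :=
    keywords.foldl (fun d k => d.setdefault k []) PySem.Dict.empty
  let maxlen : Int := index.keys.foldl (fun m k => max m (PySem.Str.len k)) 0
  let final := (PySem.Str.splitlines text).foldl (fun d line =>
    let s := PySem.Str.strip line
    (PySem.List.pyRange 0 (min (PySem.Str.len s) maxlen + 1) 1).foldl (fun d i =>
      pvHitB line d (PySem.Str.slice s none (some i))) d) index
  final.items

-- ===== PRECONDITION & SPEC =====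
def Spec_extract_cutout_currentline (text : String) (keywords : List String) (out : List (String × List String)) : Prop := out = extract_cutout_currentline_alt text keywords
instance (text : String) (keywords : List String) (out : List (String × List String)) : Decidable (Spec_extract_cutout_currentline text keywords out) := by unfold Spec_extract_cutout_currentline; infer_instance

-- ===== CLAIM (what is proved, stated in full; the proofs are below) =====
def Claim_equal_extract_cutout_currentline : Prop := ∀ (text : String) (keywords : List String), Dom_extract_cutout_currentline text keywords → Spec_extract_cutout_currentline text keywords (extract_cutout_currentline text keywords)

-- ===== LEMMAS AND PROOFS =====

-- the common value of both programs: keywords (first occurrences) each mapped to its matching lines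
def pvGroup (text : String) (keywords : List String) : List (String × List String) :=
  (PySem.Set.ofList keywords).map (fun k =>
    (k, (PySem.Str.splitlines text).filter (fun line => PySem.Str.startswith (PySem.Str.strip line) k)))

-- A's dict-comprehension init: items are the distinct keywords, each mapped to []
lemma items_init_insert (ks : List String) (d : PySem.Dict String (List String)) (s : List String)
    (h : d.items = s.map (fun k => (k, ([] : List String)))) :
    (ks.foldl (fun d k => d.insert k []) d).items = (PySem.Set.update s ks).map (fun k => (k, [])) := by
  induction ks generalizing d s with
  | nil => simpa [PySem.Set.update] using h
  | cons k rest ih =>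
    have hkeys : d.keys = s := by
      simp [PySem.Dict.keys, h, Function.comp_def]
    have hcont : d.contains k = decide (k ∈ s) := by
      rw [PySem.Dict.contains_eq_decide_mem_keys, hkeys]
    by_cases hk : k ∈ s
    · have h1 : (d.insert k ([] : List String)).items = s.map (fun k => (k, ([] : List String))) := by
        rw [PySem.Dict.items_insert_of_contains _ _ (by simp [hcont, hk]), h]
        simp only [List.map_map]
        apply List.map_congr_left
        intro x hx
        by_cases hxk : x = k <;> simp [Function.comp, hxk]
      simp only [List.foldl_cons, PySem.Set.update_cons, PySem.Set.add_of_mem hk]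
      exact ih _ _ h1
    · have h1 : (d.insert k ([] : List String)).items = (s ++ [k]).map (fun k => (k, ([] : List String))) := by
        rw [PySem.Dict.items_insert_of_not_contains _ _ (by simp [hcont, hk]), h]; simp
      simp only [List.foldl_cons, PySem.Set.update_cons, PySem.Set.add_of_not_mem hk]
      exact ih _ _ h1

-- B's setdefault init: same items
lemma items_init_setdefault (ks : List String) (d : PySem.Dict String (List String)) (s : List String)
    (h : d.items = s.map (fun k => (k, ([] : List String)))) :
    (ks.foldl (fun d k => d.setdefault k []) d).items = (PySem.Set.update s ks).map (fun k => (k, [])) := by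
  induction ks generalizing d s with
  | nil => simpa [PySem.Set.update] using h
  | cons k rest ih =>
    have hkeys : d.keys = s := by
      simp [PySem.Dict.keys, h, Function.comp_def]
    have hcont : d.contains k = decide (k ∈ s) := by
      rw [PySem.Dict.contains_eq_decide_mem_keys, hkeys]
    by_cases hk : k ∈ s
    · simp only [List.foldl_cons, PySem.Set.update_cons, PySem.Set.add_of_mem hk]
      rw [PySem.Dict.setdefault_of_contains (d := d) (k := k) (v := []) (by simp [hcont, hk])]
      exact ih _ _ h
    · have h1 : (d.setdefault k ([] : List String)).items = (s ++ [k]).map (fun k => (k, ([] : List String))) := by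
        rw [PySem.Dict.setdefault_of_not_contains _ _ (by simp [hcont, hk]),
          PySem.Dict.items_insert_of_not_contains _ _ (by simp [hcont, hk]), h]; simp
      simp only [List.foldl_cons, PySem.Set.update_cons, PySem.Set.add_of_not_mem hk]
      exact ih _ _ h1

-- A's inner loop: getD at k gains [line] exactly when k is a scanned keyword matching p
lemma getD_innerA (ks : List String) (hnd : ks.Nodup) (p : String → Bool) (line k : String)
    (d : PySem.Dict String (List String)) :
    (ks.foldl (fun d kw => if p kw then d.modify kw [] (fun v => v ++ [line]) else d) d).getD k []
      = d.getD k [] ++ (if k ∈ ks ∧ p k then [line] else []) := by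
  induction ks generalizing d with
  | nil => simp
  | cons kw rest ih =>
    obtain ⟨hkw, hrest⟩ := List.nodup_cons.mp hnd
    simp only [List.foldl_cons]
    rw [ih hrest]
    by_cases hk : k = kw
    · subst hk
      have hknot : k ∉ rest := hkw
      by_cases hp : p k <;> simp [hp, hknot]
    · have h1 : (if p kw then d.modify kw [] (fun v => v ++ [line]) else d).getD k [] = d.getD k [] := by
        by_cases hp : p kw <;> simp [hp, PySem.Dict.getD_modify, hk]
      rw [h1]
      simp [hk]

-- B's inner loop over candidate prefixes: keys unchanged
lemma keys_innerB (cs : List String) (line : String) (d : PySem.Dict String (List String)) :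
    (cs.foldl (pvHitB line) d).keys = d.keys := by
  induction cs generalizing d with
  | nil => rfl
  | cons c rest ih =>
    simp only [List.foldl_cons]
    rw [ih]
    unfold pvHitB
    by_cases hc : d.contains c
    · rw [if_pos hc, PySem.Dict.keys_modify, PySem.Dict.keys_insert_of_contains _ _ hc]
    · rw [if_neg hc]

-- B's inner loop: getD at a present key k gains [line] exactly when k is one of the candidates
lemma getD_innerB (cs : List String) (hnd : cs.Nodup) (line k : String)
    (d : PySem.Dict String (List String)) (hk : k ∈ d.keys) :
    (cs.foldl (pvHitB line) d).getD k [] = d.getD k [] ++ (if k ∈ cs then [line] else []) := by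
  induction cs generalizing d with
  | nil => simp
  | cons c rest ih =>
    obtain ⟨hc, hrest⟩ := List.nodup_cons.mp hnd
    simp only [List.foldl_cons]
    have hkeys : (pvHitB line d c).keys = d.keys := by
      unfold pvHitB
      by_cases h : d.contains c
      · rw [if_pos h, PySem.Dict.keys_modify, PySem.Dict.keys_insert_of_contains _ _ h]
      · rw [if_neg h]
    rw [ih hrest _ (by rw [hkeys]; exact hk)]
    by_cases hck : k = c
    · subst hck
      have hcont : d.contains k := (PySem.Dict.contains_iff_mem_keys _ _).mpr hk
      have h1 : (pvHitB line d k).getD k [] = d.getD k [] ++ [line] := by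
        unfold pvHitB
        rw [if_pos hcont]
        simp
      rw [h1]
      simp [hc]
    · have h1 : (pvHitB line d c).getD k [] = d.getD k [] := by
        unfold pvHitB
        by_cases h : d.contains c
        · rw [if_pos h]; simp [PySem.Dict.getD_modify, hck]
        · rw [if_neg h]
      rw [h1]
      simp [hck]

-- A's inner loop: keys unchanged when every scanned keyword is already a key
lemma keys_innerA (ks : List String) (p : String → Bool) (line : String)
    (d : PySem.Dict String (List String)) (h : ∀ x ∈ ks, x ∈ d.keys) :
    (ks.foldl (fun d kw => if p kw then d.modify kw [] (fun v => v ++ [line]) else d) d).keys = d.keys := by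
  induction ks generalizing d with
  | nil => rfl
  | cons kw rest ih =>
    have hkw : d.contains kw := (PySem.Dict.contains_iff_mem_keys _ _).mpr (h kw (by simp))
    have hkeys : (if p kw then d.modify kw [] (fun v => v ++ [line]) else d).keys = d.keys := by
      by_cases hp : p kw
      · rw [if_pos hp, PySem.Dict.keys_modify, PySem.Dict.keys_insert_of_contains _ _ hkw]
      · rw [if_neg hp]
    simp only [List.foldl_cons]
    rw [ih _ (by intro x hx; rw [hkeys]; exact h x (by simp [hx])), hkeys]

-- the candidate prefixes of B for a given stripped line
def pvPrefixes (s : String) (M : Int) : List String :=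
  (PySem.List.pyRange 0 (min (PySem.Str.len s) M + 1) 1).map (fun i => PySem.Str.slice s none (some i))

lemma toList_prefix_slice (s : String) (i : Int) (h0 : 0 ≤ i) :
    (PySem.Str.slice s none (some i)).toList = s.toList.take i.toNat := by
  rw [PySem.Str.toList_slice, PySem.Chars.slice_eq_listSlice, PySem.List.slice_to _ h0]

lemma nodup_pvPrefixes (s : String) (M : Int) : (pvPrefixes s M).Nodup := by
  unfold pvPrefixes
  apply List.Nodup.map_on _ (PySem.List.nodup_pyRange_one _ _)
  intro i hi j hj hij
  rw [PySem.List.mem_pyRange_one] at hi hj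
  have hi' : i.toNat ≤ s.toList.length := by
    have := PySem.Str.len_eq s
    omega
  have hj' : j.toNat ≤ s.toList.length := by
    have := PySem.Str.len_eq s
    omega
  have : s.toList.take i.toNat = s.toList.take j.toNat := by
    rw [← toList_prefix_slice s i hi.1, ← toList_prefix_slice s j hj.1, hij]
  have hlen : min i.toNat s.toList.length = min j.toNat s.toList.length := by
    simpa using congrArg List.length this
  rw [Nat.min_eq_left hi', Nat.min_eq_left hj'] at hlen
  omega

lemma mem_pvPrefixes (s k : String) (M : Int) (hM : PySem.Str.len k ≤ M) :
    k ∈ pvPrefixes s M ↔ PySem.Str.startswith s k = true := by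
  unfold pvPrefixes
  rw [List.mem_map]
  constructor
  · rintro ⟨i, hi, rfl⟩
    rw [PySem.List.mem_pyRange_one] at hi
    rw [PySem.Str.startswith_eq, PySem.Chars.startswith_iff, toList_prefix_slice s i hi.1]
    exact List.take_prefix _ _
  · intro h
    rw [PySem.Str.startswith_eq, PySem.Chars.startswith_iff] at h
    refine ⟨(k.toList.length : Int), ?_, ?_⟩
    · rw [PySem.List.mem_pyRange_one]
      have h1 : k.toList.length ≤ s.toList.length := h.length_le
      have h2 := PySem.Str.len_eq s
      have h3 := PySem.Str.len_eq k
      omega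
    · apply String.ext
      show (PySem.Str.slice s none (some (k.toList.length : Int))).toList = k.toList
      rw [toList_prefix_slice s _ (by positivity), Int.toNat_natCast]
      exact (List.prefix_iff_eq_take.mp h).symm

-- B's outer loop, per key: matching lines are appended in order
lemma getD_outerB (lines : List String) (M : Int) (k : String)
    (d : PySem.Dict String (List String)) (hk : k ∈ d.keys) (hM : PySem.Str.len k ≤ M) :
    (lines.foldl (fun d line => (pvPrefixes (PySem.Str.strip line) M).foldl (pvHitB line) d) d).getD k []
      = d.getD k [] ++ lines.filter (fun line => PySem.Str.startswith (PySem.Str.strip line) k) := by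
  induction lines generalizing d with
  | nil => simp
  | cons l rest ih =>
    simp only [List.foldl_cons]
    rw [ih _ (by rw [keys_innerB]; exact hk),
      getD_innerB _ (nodup_pvPrefixes _ _) l k d hk]
    simp only [mem_pvPrefixes (PySem.Str.strip l) k M hM, List.filter_cons, List.append_assoc]
    split <;> simp

-- A's outer loop, per scanned key: matching lines are appended in order
lemma getD_outerA (lines : List String) (ks : List String) (hnd : ks.Nodup) (k : String) (hk : k ∈ ks)
    (d : PySem.Dict String (List String)) :
    (lines.foldl (fun d line =>
        ks.foldl (fun d kw => if PySem.Str.startswith (PySem.Str.strip line) kw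
          then d.modify kw [] (fun v => v ++ [line]) else d) d) d).getD k []
      = d.getD k [] ++ lines.filter (fun line => PySem.Str.startswith (PySem.Str.strip line) k) := by
  induction lines generalizing d with
  | nil => simp
  | cons l rest ih =>
    simp only [List.foldl_cons]
    rw [ih, getD_innerA ks hnd _ l k d]
    simp only [hk, true_and, List.filter_cons, List.append_assoc]
    split <;> simp

-- A's outer loop: keys unchanged
lemma keys_outerA (lines ks : List String) (d : PySem.Dict String (List String))
    (h : ∀ x ∈ ks, x ∈ d.keys) :
    (lines.foldl (fun d line =>
        ks.foldl (fun d kw => if PySem.Str.startswith (PySem.Str.strip line) kw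
          then d.modify kw [] (fun v => v ++ [line]) else d) d) d).keys = d.keys := by
  induction lines generalizing d with
  | nil => rfl
  | cons l rest ih =>
    simp only [List.foldl_cons]
    rw [ih _ (by intro x hx; rw [keys_innerA _ _ _ _ h]; exact h x hx), keys_innerA _ _ _ _ h]

-- B's outer loop: keys unchanged
lemma keys_outerB (lines : List String) (M : Int) (d : PySem.Dict String (List String)) :
    (lines.foldl (fun d line => (pvPrefixes (PySem.Str.strip line) M).foldl (pvHitB line) d) d).keys = d.keys := by
  induction lines generalizing d with
  | nil => rfl
  | cons l rest ih =>
    simp only [List.foldl_cons]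
    rw [ih, keys_innerB]

lemma A_eq_group (text : String) (keywords : List String) :
    extract_cutout_currentline text keywords = pvGroup text keywords := by
  unfold extract_cutout_currentline pvGroup
  simp only []
  set K : List String := PySem.Set.ofList keywords with hK
  have hinit : (keywords.foldl (fun d k => d.insert k []) PySem.Dict.empty).items
      = K.map (fun k => (k, ([] : List String))) := by
    rw [items_init_insert keywords PySem.Dict.empty [] (by rfl)]
    rw [PySem.Set.update_nil_left]
  set d0 := keywords.foldl (fun d k => d.insert k []) PySem.Dict.empty with hd0
  have hkeys0 : d0.keys = K := by
    simp [PySem.Dict.keys, hinit, Function.comp_def]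
  have hsub : ∀ x ∈ K, x ∈ d0.keys := by intro x hx; rw [hkeys0]; exact hx
  set final := (PySem.Str.splitlines text).foldl (fun d line =>
      K.foldl (fun d keyword => if PySem.Str.startswith (PySem.Str.strip line) keyword
        then d.modify keyword [] (fun v => v ++ [line]) else d) d) d0 with hfinal
  have hkeys : final.keys = K := by
    rw [hfinal, keys_outerA _ _ _ hsub, hkeys0]
  have hnd : final.keys.Nodup := by rw [hkeys]; exact PySem.Set.nodup_ofList keywords
  rw [PySem.Dict.items_eq_map_keys final hnd [], hkeys]
  apply List.map_congr_left
  intro k hkK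
  have hgd0 : d0.getD k [] = [] := by
    apply PySem.Dict.getD_of_mem_items
    · rw [hinit, List.mem_map]; exact ⟨k, hkK, rfl⟩
    · rw [hkeys0]; exact PySem.Set.nodup_ofList keywords
  rw [hfinal, getD_outerA _ K (PySem.Set.nodup_ofList keywords) k hkK d0, hgd0, List.nil_append]

lemma B_eq_group (text : String) (keywords : List String) :
    extract_cutout_currentline_alt text keywords = pvGroup text keywords := by
  unfold extract_cutout_currentline_alt pvGroup
  simp only []
  set K : List String := PySem.Set.ofList keywords with hK
  have hinit : (keywords.foldl (fun d k => d.setdefault k []) PySem.Dict.empty).items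
      = K.map (fun k => (k, ([] : List String))) := by
    rw [items_init_setdefault keywords PySem.Dict.empty [] (by rfl)]
    rw [PySem.Set.update_nil_left]
  set d0 := keywords.foldl (fun d k => d.setdefault k []) PySem.Dict.empty with hd0
  have hkeys0 : d0.keys = K := by
    simp [PySem.Dict.keys, hinit, Function.comp_def]
  set M := d0.keys.foldl (fun m k => max m (PySem.Str.len k)) 0 with hM
  have hMle : ∀ k ∈ K, PySem.Str.len k ≤ M := by
    intro k hk
    rw [hM]
    have : d0.keys.foldl (fun m k => max m (PySem.Str.len k)) 0
        = (d0.keys.map PySem.Str.len).foldl max 0 := (List.foldl_map).symm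
    rw [this]
    exact (PySem.List.le_foldl_max _ _).2 _ (List.mem_map_of_mem (by rw [hkeys0]; exact hk))
  have hfold : ∀ (d : PySem.Dict String (List String)),
      (PySem.Str.splitlines text).foldl (fun d line =>
        (PySem.List.pyRange 0 (min (PySem.Str.len (PySem.Str.strip line)) M + 1) 1).foldl (fun d i =>
          pvHitB line d (PySem.Str.slice (PySem.Str.strip line) none (some i))) d) d
      = (PySem.Str.splitlines text).foldl (fun d line =>
        (pvPrefixes (PySem.Str.strip line) M).foldl (pvHitB line) d) d := by
    intro d
    have hstep : (fun (d : PySem.Dict String (List String)) line =>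
        (PySem.List.pyRange 0 (min (PySem.Str.len (PySem.Str.strip line)) M + 1) 1).foldl (fun d i =>
          pvHitB line d (PySem.Str.slice (PySem.Str.strip line) none (some i))) d)
        = (fun (d : PySem.Dict String (List String)) line =>
          (pvPrefixes (PySem.Str.strip line) M).foldl (pvHitB line) d) := by
      funext d' line
      unfold pvPrefixes
      rw [List.foldl_map]
    rw [hstep]
  rw [hfold]
  set final := (PySem.Str.splitlines text).foldl (fun d line =>
      (pvPrefixes (PySem.Str.strip line) M).foldl (pvHitB line) d) d0 with hfinal
  have hkeys : final.keys = K := by rw [hfinal, keys_outerB, hkeys0]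
  have hnd : final.keys.Nodup := by rw [hkeys]; exact PySem.Set.nodup_ofList keywords
  rw [PySem.Dict.items_eq_map_keys final hnd [], hkeys]
  apply List.map_congr_left
  intro k hkK
  have hgd0 : d0.getD k [] = [] := by
    apply PySem.Dict.getD_of_mem_items
    · rw [hinit, List.mem_map]; exact ⟨k, hkK, rfl⟩
    · rw [hkeys0]; exact PySem.Set.nodup_ofList keywords
  rw [hfinal, getD_outerB _ M k d0 (by rw [hkeys0]; exact hkK) (hMle k hkK), hgd0, List.nil_append]

-- ===== VERDICT (by name: the statement is the Claim_ definition above) =====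
theorem extract_cutout_currentline_spec : Claim_equal_extract_cutout_currentline := by
  intro text keywords _
  unfold Spec_extract_cutout_currentline
  rw [A_eq_group, B_eq_group]
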